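-- pv_equiv track=rewrite | github.com/sca075/Python-package-valetudo-map-parser | tests/test_rand_to_hypfer_compression.py | compress_rand_to_hypfer
-- ===== SOURCE A (Python) =====
-- def compress_rand_to_hypfer(
--     pixel_indices: list,
--     image_width: int,
--     image_height: int,
--     image_top: int = 0,
--     image_left: int = 0,
-- ) -> list:
--     """
--     Convert Rand256 pixel indices to Hypfer compressed format.
--
--     Args:
--         pixel_indices: List of pixel indices [30358, 30359, 30360, ...]
--         image_width: Width of the image
--         image_height: Height of the image
--         image_top: Top offset
--         image_left: Left offset
--
--     Returns:
--         Flat list in Hypfer format: [x, y, length, x, y, length, ...]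
--     """
--     if not pixel_indices:
--         return []
--
--     compressed = []
--
--     # Convert indices to (x, y) coordinates and group consecutive runs
--     prev_x = prev_y = None
--     run_start_x = run_y = None
--     run_length = 0
--
--     for idx in pixel_indices:
--         # Convert pixel index to x, y coordinates
--         # Same formula as in from_rrm_to_compressed_pixels
--         x = (idx % image_width) + image_left
--         y = ((image_height - 1) - (idx // image_width)) + image_top
--
--         if run_start_x is None:
--             # Start first run
--             run_start_x, run_y, run_length = x, y, 1
--         elif y == run_y and x == prev_x + 1:
--             # Continue current run (same row, consecutive x)
--             run_length += 1
--         else: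
--             # End current run, start new one
--             compressed.extend([run_start_x, run_y, run_length])
--             run_start_x, run_y, run_length = x, y, 1
--
--         prev_x, prev_y = x, y
--
--     # Add final run
--     if run_start_x is not None:
--         compressed.extend([run_start_x, run_y, run_length])
--
--     return compressed
-- ===== SOURCE B (Python) =====
-- def compress_rand_to_hypfer(
--     pixel_indices: list,
--     image_width: int,
--     image_height: int,
--     image_top: int = 0,
--     image_left: int = 0,
-- ) -> list:
--     if not pixel_indices:
--         return []
--     coords = [(idx % image_width + image_left,
--                (image_height - 1) - idx // image_width + image_top)
--               for idx in pixel_indices]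
--     # Run-start flags: position 0 and every position that does not continue its predecessor.
--     breaks = [True] + [not (y == py and x == px + 1)
--                        for (px, py), (x, y) in zip(coords, coords[1:])]
--     starts = [i for i, b in enumerate(breaks) if b]
--     ends = starts[1:] + [len(coords)]
--     out = []
--     for s, e in zip(starts, ends):
--         x, y = coords[s]
--         out += [x, y, e - s]
--     return out
-- ===== Notes on version B (the rewrite author's own statement) =====
-- stated objective: alternative
-- what changed: Replaces A's stateful fused loop (prev_x/prev_y plus a mutable current-run triple flushed on break) by a staged index-based algorithm: map indices to coordinates, compute break flags from adjacent coordinate pairs, collect run-start positions via enumerate, and emit each [x,y,length] triple from consecutive start positions with length as an index difference.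
import Mathlib
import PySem

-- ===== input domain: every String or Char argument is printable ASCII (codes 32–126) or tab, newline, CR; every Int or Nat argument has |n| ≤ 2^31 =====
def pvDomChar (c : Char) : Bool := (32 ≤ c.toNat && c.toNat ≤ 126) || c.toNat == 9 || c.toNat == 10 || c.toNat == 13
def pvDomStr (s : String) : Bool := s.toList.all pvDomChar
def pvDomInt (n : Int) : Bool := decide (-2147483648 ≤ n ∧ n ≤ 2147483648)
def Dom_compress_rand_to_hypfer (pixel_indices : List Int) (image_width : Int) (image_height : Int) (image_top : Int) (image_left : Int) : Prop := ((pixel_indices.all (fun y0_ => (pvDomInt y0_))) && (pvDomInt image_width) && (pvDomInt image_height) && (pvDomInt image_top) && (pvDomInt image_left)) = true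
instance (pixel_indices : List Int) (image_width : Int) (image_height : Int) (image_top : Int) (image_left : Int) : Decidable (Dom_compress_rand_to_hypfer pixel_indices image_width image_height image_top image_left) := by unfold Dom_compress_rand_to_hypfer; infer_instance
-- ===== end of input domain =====

-- B replaces A's stateful single-pass run accumulator by a staged, index-based algorithm:
-- map to coordinates, mark the run-START positions from adjacent pairs, and emit each
-- triple from consecutive start positions (objective: alternative algorithm, same O(n)).

-- ===== PORT A =====
-- A's loop state: (compressed, prev_x, prev_y, run) where run = some (run_start_x, run_y, run_length)
-- and 'run = none' transliterates Python's 'run_start_x is None'.  'prev_x.getD 0' is only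
-- evaluated when run ≠ none, where Python's prev_x is an int (so the default is never used).
def pvStepA (image_width image_height image_top image_left : Int)
    (st : List Int × Option Int × Option Int × Option (Int × Int × Int)) (idx : Int) :
    List Int × Option Int × Option Int × Option (Int × Int × Int) :=
  let x := PySem.Int.mod idx image_width + image_left
  let y := (image_height - 1) - PySem.Int.floordiv idx image_width + image_top
  match st with
  | (comp, _prev_x, _prev_y, none) =>
      (comp, some x, some y, some (x, y, 1))
  | (comp, prev_x, _prev_y, some (rsx, ry, rl)) =>
      if y = ry ∧ x = prev_x.getD 0 + 1 then
        (comp, some x, some y, some (rsx, ry, rl + 1))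
      else
        (comp ++ [rsx, ry, rl], some x, some y, some (x, y, 1))

def compress_rand_to_hypfer (pixel_indices : List Int) (image_width : Int) (image_height : Int) (image_top : Int) (image_left : Int) : List Int :=
  if pixel_indices = [] then []
  else
    let st := pixel_indices.foldl (pvStepA image_width image_height image_top image_left)
      ([], none, none, none)
    match st.2.2.2 with
    | some (rsx, ry, rl) => st.1 ++ [rsx, ry, rl]
    | none => st.1

-- ===== PORT B =====
def pvCoord (image_width image_height image_top image_left idx : Int) : Int × Int :=
  (PySem.Int.mod idx image_width + image_left,
   (image_height - 1) - PySem.Int.floordiv idx image_width + image_top)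

-- '(x, y) continues (px, py)': y == py and x == px + 1
def pvCont (p q : Int × Int) : Bool := q.2 == p.2 && q.1 == p.1 + 1

def compress_rand_to_hypfer_alt (pixel_indices : List Int) (image_width : Int) (image_height : Int) (image_top : Int) (image_left : Int) : List Int :=
  if pixel_indices = [] then []
  else
    let coords := pixel_indices.map (pvCoord image_width image_height image_top image_left)
    let breaks := true :: (List.zip coords coords.tail).map (fun pq => !pvCont pq.1 pq.2)
    let starts := ((PySem.List.enumerate breaks).filter (fun ib => ib.2)).map (fun ib => ib.1)
    let ends := starts.tail ++ [(coords.length : Int)]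
    (List.zip starts ends).flatMap (fun se =>
      -- coords[s]: every start s satisfies 0 ≤ s < len coords, so the default is never used
      let p := PySem.List.pyGetD coords se.1 (0, 0)
      [p.1, p.2, se.2 - se.1])

-- ===== PRECONDITION & SPEC =====
-- Pre_ excludes exactly the inputs where Python A raises ZeroDivisionError:
-- image_width = 0 with a nonempty pixel list (B raises there too).
def Pre_compress_rand_to_hypfer (pixel_indices : List Int) (image_width : Int) (image_height : Int) (image_top : Int) (image_left : Int) : Prop :=
  pixel_indices = [] ∨ image_width ≠ 0
instance (pixel_indices : List Int) (image_width : Int) (image_height : Int) (image_top : Int) (image_left : Int) : Decidable (Pre_compress_rand_to_hypfer pixel_indices image_width image_height image_top image_left) := by unfold Pre_compress_rand_to_hypfer; infer_instance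

def pvWitness_compress_rand_to_hypfer : List Int × Int × Int × Int × Int := ([7, 8, 9, 3], 4, 5, 0, 0)

def Spec_compress_rand_to_hypfer (pixel_indices : List Int) (image_width : Int) (image_height : Int) (image_top : Int) (image_left : Int) (out : List Int) : Prop := out = compress_rand_to_hypfer_alt pixel_indices image_width image_height image_top image_left
instance (pixel_indices : List Int) (image_width : Int) (image_height : Int) (image_top : Int) (image_left : Int) (out : List Int) : Decidable (Spec_compress_rand_to_hypfer pixel_indices image_width image_height image_top image_left out) := by unfold Spec_compress_rand_to_hypfer; infer_instance

-- ===== CLAIM (what is proved, stated in full; the proofs are below) =====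
def Claim_equal_compress_rand_to_hypfer : Prop := ∀ (pixel_indices : List Int) (image_width : Int) (image_height : Int) (image_top : Int) (image_left : Int), Dom_compress_rand_to_hypfer pixel_indices image_width image_height image_top image_left → Pre_compress_rand_to_hypfer pixel_indices image_width image_height image_top image_left → Spec_compress_rand_to_hypfer pixel_indices image_width image_height image_top image_left (compress_rand_to_hypfer pixel_indices image_width image_height image_top image_left)

-- ===== LEMMAS AND PROOFS =====

-- (length of the maximal continuation prefix, remainder)
def pvCountCont : (Int × Int) → List (Int × Int) → Nat × List (Int × Int)
  | _, [] => (0, [])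
  | p, q :: rest =>
      if pvCont p q then ((pvCountCont q rest).1 + 1, (pvCountCont q rest).2)
      else (0, q :: rest)

lemma pvCountCont_snd_le : ∀ (cs : List (Int × Int)) (p : Int × Int),
    (pvCountCont p cs).2.length ≤ cs.length := by
  intro cs
  induction cs with
  | nil => intro p; simp [pvCountCont]
  | cons q rest ih =>
    intro p
    by_cases h : pvCont p q = true
    · simp only [pvCountCont, if_pos h]
      exact le_trans (ih q) (Nat.le_succ _)
    · simp [pvCountCont, h]

lemma pvCountCont_fst_le : ∀ (cs : List (Int × Int)) (p : Int × Int),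
    (pvCountCont p cs).1 ≤ cs.length := by
  intro cs
  induction cs with
  | nil => intro p; simp [pvCountCont]
  | cons q rest ih =>
    intro p
    by_cases h : pvCont p q = true
    · simp only [pvCountCont, if_pos h, List.length_cons]
      exact Nat.succ_le_succ (ih q)
    · simp [pvCountCont, h]

-- canonical run-length encoding of a coordinate list
def pvEmitRuns : List (Int × Int) → List Int
  | [] => []
  | p :: rest =>
      p.1 :: p.2 :: (((pvCountCont p rest).1 + 1 : Nat) : Int) ::
        pvEmitRuns (pvCountCont p rest).2
termination_by c => c.length
decreasing_by
  simp only [List.length_cons]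
  exact Nat.lt_succ_of_le (pvCountCont_snd_le _ _)

lemma pvCountCont_drop : ∀ (cs : List (Int × Int)) (p : Int × Int),
    (p :: cs).drop ((pvCountCont p cs).1 + 1) = (pvCountCont p cs).2 := by
  intro cs
  induction cs with
  | nil => intro p; simp [pvCountCont]
  | cons q rest ih =>
    intro p
    by_cases h : pvCont p q = true
    · simp only [pvCountCont, if_pos h]
      have := ih q
      simpa [List.drop_succ_cons] using this
    · simp [pvCountCont, h]

lemma pvCountCont_length (cs : List (Int × Int)) (p : Int × Int) :
    (p :: cs).length = (pvCountCont p cs).1 + 1 + (pvCountCont p cs).2.length := by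
  have hd := congrArg List.length (pvCountCont_drop cs p)
  have h1 := pvCountCont_fst_le cs p
  simp only [List.length_drop, List.length_cons] at hd ⊢
  omega

-- the break flags after the head, threaded recursively
def pvBmap : (Int × Int) → List (Int × Int) → List Bool
  | _, [] => []
  | p, q :: rest => (!pvCont p q) :: pvBmap q rest

lemma pvBmap_zip : ∀ (rest : List (Int × Int)) (p : Int × Int),
    (List.zip (p :: rest) rest).map (fun pq => !pvCont pq.1 pq.2) = pvBmap p rest := by
  intro rest
  induction rest with
  | nil => intro p; simp [pvBmap]
  | cons q r ih => intro p; simp [List.zip, pvBmap, ← ih q, List.zipWith]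

lemma pvBmap_decomp : ∀ (rest : List (Int × Int)) (p : Int × Int),
    pvBmap p rest = List.replicate (pvCountCont p rest).1 false ++
      (match (pvCountCont p rest).2 with
       | [] => []
       | q :: r' => true :: pvBmap q r') := by
  intro rest
  induction rest with
  | nil => intro p; simp [pvBmap, pvCountCont]
  | cons q r ih =>
    intro p
    by_cases h : pvCont p q = true
    · simp only [pvBmap, pvCountCont, h, Bool.not_true]
      exact congrArg _ (ih q)
    · simp [pvBmap, pvCountCont, h]

-- indices (from offset s) of the true flags
def pvTrueIdx (s : Int) (bs : List Bool) : List Int :=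
  ((PySem.List.enumerate bs s).filter (fun ib => ib.2)).map (fun ib => ib.1)

lemma pvTrueIdx_append (s : Int) (b1 b2 : List Bool) :
    pvTrueIdx s (b1 ++ b2) = pvTrueIdx s b1 ++ pvTrueIdx (s + b1.length) b2 := by
  simp [pvTrueIdx, PySem.List.enumerate_append, List.filter_append]

lemma pvTrueIdx_cons (s : Int) (b : Bool) (bs : List Bool) :
    pvTrueIdx s (b :: bs) = (if b then [s] else []) ++ pvTrueIdx (s + 1) bs := by
  cases b <;> simp [pvTrueIdx, PySem.List.enumerate_cons]

lemma pvTrueIdx_shift : ∀ (bs : List Bool) (s : Int),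
    pvTrueIdx s bs = (pvTrueIdx 0 bs).map (· + s) := by
  intro bs
  induction bs with
  | nil => intro s; simp [pvTrueIdx]
  | cons b bs ih =>
    intro s
    rw [pvTrueIdx_cons, pvTrueIdx_cons, ih (s + 1), show (0:Int) + 1 = 1 from rfl, ih 1,
      List.map_append, List.map_map]
    cases b <;> simp <;> (intro a _; ring)

lemma pvTrueIdx_replicate_false (k : Nat) (s : Int) :
    pvTrueIdx s (List.replicate k false) = [] := by
  induction k generalizing s with
  | zero => simp [pvTrueIdx]
  | succ n ih => rw [List.replicate_succ, pvTrueIdx_cons]; simpa using ih (s + 1)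

lemma pvTrueIdx_run (s : Int) (k : Nat) :
    pvTrueIdx s (true :: List.replicate k false) = [s] := by
  rw [pvTrueIdx_cons, pvTrueIdx_replicate_false]; simp

lemma pvTrueIdx_nonneg : ∀ (bs : List Bool) (s x : Int), x ∈ pvTrueIdx s bs → s ≤ x := by
  intro bs s x hx
  simp only [pvTrueIdx, List.mem_map, List.mem_filter] at hx
  obtain ⟨ib, ⟨hmem, _⟩, rfl⟩ := hx
  rw [PySem.List.mem_enumerate_iff] at hmem
  obtain ⟨k, hk, rfl⟩ := hmem
  exact le_add_of_nonneg_right (by positivity)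

lemma pvGetD_drop (c : List (Int × Int)) (m : Nat) (s : Int) (d : Int × Int) (hs : 0 ≤ s) :
    PySem.List.pyGetD c (s + (m : Int)) d = PySem.List.pyGetD (c.drop m) s d := by
  rw [PySem.List.pyGetD_of_nonneg c d (by omega), PySem.List.pyGetD_of_nonneg _ d hs,
      List.getD_eq_getElem?_getD, List.getD_eq_getElem?_getD, List.getElem?_drop]
  have hidx : (s + (m : Int)).toNat = m + s.toNat := by omega
  rw [hidx]

-- B's body on an already-computed coordinate list
def pvBcore (c : List (Int × Int)) : List Int :=
  let breaks := true :: (List.zip c c.tail).map (fun pq => !pvCont pq.1 pq.2)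
  let starts := pvTrueIdx 0 breaks
  let ends := starts.tail ++ [(c.length : Int)]
  (List.zip starts ends).flatMap (fun se =>
    let p := PySem.List.pyGetD c se.1 (0, 0)
    [p.1, p.2, se.2 - se.1])

lemma pvBcore_eq : ∀ (n : Nat) (c : List (Int × Int)), c.length ≤ n → c ≠ [] →
    pvBcore c = pvEmitRuns c := by
  intro n
  induction n with
  | zero =>
    intro c hc hne
    cases c with
    | nil => exact absurd rfl hne
    | cons p rest => simp at hc
  | succ n ih =>
    intro c hlen hne
    obtain ⟨p, rest, rfl⟩ : ∃ p rest, c = p :: rest := by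
      cases c with
      | nil => exact absurd rfl hne
      | cons p rest => exact ⟨p, rest, rfl⟩
    have hlenc := pvCountCont_length rest p
    have hdrop := pvCountCont_drop rest p
    have hbm := pvBmap_decomp rest p
    rcases hR : (pvCountCont p rest).2 with _ | ⟨q, r'⟩
    · -- single run to the end
      rw [hR] at hbm hlenc
      simp only [List.append_nil] at hbm
      rw [show pvEmitRuns (p :: rest)
            = p.1 :: p.2 :: (((pvCountCont p rest).1 + 1 : Nat) : Int) ::
              pvEmitRuns (pvCountCont p rest).2 from by rw [pvEmitRuns], hR]
      simp only [pvBcore, List.tail_cons, pvBmap_zip rest p, hbm, pvTrueIdx_run,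
        List.tail_cons]
      simp [pvEmitRuns, PySem.List.pyGetD_zero_cons]
      simp only [List.length_cons, List.length_nil] at hlenc
      omega
    · -- at least two runs: split off the first
      rw [hR] at hbm hlenc hdrop
      have hrne : (q :: r') ≠ ([] : List (Int × Int)) := by simp
      have hrlen : (q :: r').length ≤ n := by
        simp only [List.length_cons] at hlenc hlen ⊢
        omega
      have hIH := ih (q :: r') hrlen hrne
      -- breaks of c decompose
      have hbrk : (true :: (List.zip (p :: rest) (p :: rest).tail).map
            (fun pq => !pvCont pq.1 pq.2))
          = (true :: List.replicate (pvCountCont p rest).1 false) ++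
            (true :: pvBmap q r') := by
        simp only [List.tail_cons, pvBmap_zip rest p, hbm, List.cons_append]
      rw [show pvEmitRuns (p :: rest)
            = p.1 :: p.2 :: (((pvCountCont p rest).1 + 1 : Nat) : Int) ::
              pvEmitRuns (pvCountCont p rest).2 from by rw [pvEmitRuns], hR]
      simp only [pvBcore, List.tail_cons]
      rw [pvBmap_zip rest p, hbm,
        show (true :: (List.replicate (pvCountCont p rest).1 false ++ true :: pvBmap q r'))
          = (true :: List.replicate (pvCountCont p rest).1 false) ++ (true :: pvBmap q r')
          from by simp,
        pvTrueIdx_append, pvTrueIdx_run, pvTrueIdx_shift]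
      simp only [List.length_cons, List.length_replicate, zero_add]
      rw [pvTrueIdx_cons]
      simp only [if_true, zero_add, List.cons_append, List.nil_append, List.map_cons,
        List.tail_cons]
      obtain ⟨m, hm⟩ : ∃ m, (pvCountCont p rest).1 + 1 = m := ⟨_, rfl⟩
      rw [hm] at hdrop hlenc
      rw [hm]
      set T := pvTrueIdx 1 (pvBmap q r') with hT
      have hlen2 : ((rest.length + 1 : Nat) : Int) = ((q :: r').length : Int) + (m : Int) := by
        simp only [List.length_cons] at hlenc ⊢
        push_cast
        omega
      rw [show ((m : Int) :: List.map (fun x => x + (m : Int)) T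
            = List.map (fun x => x + (m : Int)) (0 :: T)) from by simp]
      rw [show (List.map (fun x => x + (m : Int)) T ++ [((rest.length + 1 : Nat) : Int)]
            = List.map (fun x => x + (m : Int)) (T ++ [((q :: r').length : Int)])) from by
        rw [List.map_append]; simp [hlen2]]
      rw [List.zip_cons_cons, List.zip_map, List.flatMap_cons, List.flatMap_map]
      simp only [Prod.map_fst, Prod.map_snd]
      have hcong : ∀ se ∈ (0 :: T).zip (T ++ [((q :: r').length : Int)]),
          [(PySem.List.pyGetD (p :: rest) (se.1 + (m : Int)) ((0 : Int), (0 : Int))).1,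
           (PySem.List.pyGetD (p :: rest) (se.1 + (m : Int)) ((0 : Int), (0 : Int))).2,
           (se.2 + (m : Int)) - (se.1 + (m : Int))]
          = [(PySem.List.pyGetD (q :: r') se.1 ((0 : Int), (0 : Int))).1,
             (PySem.List.pyGetD (q :: r') se.1 ((0 : Int), (0 : Int))).2, se.2 - se.1] := by
        intro se hse
        have h1 := (List.of_mem_zip hse).1
        have hnn : 0 ≤ se.1 := by
          rcases List.mem_cons.mp h1 with h' | h'
          · rw [h']
          · have := pvTrueIdx_nonneg (pvBmap q r') 1 se.1 (hT ▸ h')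
            omega
        rw [pvGetD_drop (p :: rest) m se.1 ((0 : Int), (0 : Int)) hnn, hdrop]
        have harith : (se.2 + (m : Int)) - (se.1 + (m : Int)) = se.2 - se.1 := by ring
        rw [harith]
      have hstep := List.flatMap_congr hcong
      rw [hstep]
      have hBr : List.flatMap
            (fun se => [(PySem.List.pyGetD (q :: r') se.1 ((0 : Int), (0 : Int))).1,
                        (PySem.List.pyGetD (q :: r') se.1 ((0 : Int), (0 : Int))).2,
                        se.2 - se.1])
            ((0 :: T).zip (T ++ [((q :: r').length : Int)]))
          = pvBcore (q :: r') := by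
        simp only [pvBcore, List.tail_cons, pvBmap_zip r' q, pvTrueIdx_cons, if_true,
          zero_add, List.cons_append, List.nil_append, hT]
      rw [hBr, hIH]
      simp [PySem.List.pyGetD_zero_cons]

def pvFinA (st : List Int × Option Int × Option Int × Option (Int × Int × Int)) : List Int :=
  match st.2.2.2 with
  | some (rsx, ry, rl) => st.1 ++ [rsx, ry, rl]
  | none => st.1

-- invariant: A's prev coordinate is (run_start_x + run_length - 1, run_y)
lemma pvFoldA (w h t l : Int) : ∀ (xs : List Int) (comp : List Int) (sx ry len py : Int),
    pvFinA (xs.foldl (pvStepA w h t l) (comp, some (sx + len - 1), some py, some (sx, ry, len)))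
      = comp ++ sx :: ry ::
          (len + ((pvCountCont (sx + len - 1, ry) (xs.map (pvCoord w h t l))).1 : Int)) ::
          pvEmitRuns (pvCountCont (sx + len - 1, ry) (xs.map (pvCoord w h t l))).2 := by
  intro xs
  induction xs with
  | nil => intro comp sx ry len py; simp [pvFinA, pvCountCont, pvEmitRuns]
  | cons a as ih =>
    intro comp sx ry len py
    simp only [List.foldl_cons, List.map_cons, pvStepA, pvCoord]
    set x := PySem.Int.mod a w + l with hx
    set y := (h - 1) - PySem.Int.floordiv a w + t with hy
    by_cases hc : y = ry ∧ x = sx + len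
    · rw [if_pos (by simpa [Option.getD] using ⟨hc.1, by omega⟩)]
      have hcont : pvCont (sx + len - 1, ry) (x, y) = true := by
        simp [pvCont]; constructor
        · exact hc.1
        · omega
      rw [show (pvCountCont (sx + len - 1, ry) ((x, y) :: as.map (pvCoord w h t l)))
            = ((pvCountCont (x, y) (as.map (pvCoord w h t l))).1 + 1,
               (pvCountCont (x, y) (as.map (pvCoord w h t l))).2) from by
        simp [pvCountCont, hcont]]
      have := ih comp sx ry (len + 1) y
      have hx1 : sx + (len + 1) - 1 = x := by omega
      rw [hx1] at this
      rw [this, ← hc.1]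
      push_cast
      ring_nf
    · rw [if_neg (by simp only [Option.getD]; intro hcon; exact hc ⟨hcon.1, by omega⟩)]
      have hncont : pvCont (sx + len - 1, ry) (x, y) = false := by
        simp only [pvCont, Bool.and_eq_false_iff]
        by_cases h1 : y = ry
        · right; simp only [beq_eq_false_iff_ne, ne_eq]; intro hcon; exact hc ⟨h1, by omega⟩
        · left; simp only [beq_eq_false_iff_ne, ne_eq]; exact h1
      rw [show (pvCountCont (sx + len - 1, ry) ((x, y) :: as.map (pvCoord w h t l)))
            = (0, (x, y) :: as.map (pvCoord w h t l)) from by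
        simp [pvCountCont, hncont]]
      have := ih (comp ++ [sx, ry, len]) x y 1 y
      have hx1 : x + 1 - 1 = x := by omega
      rw [hx1] at this
      rw [this]
      simp [pvEmitRuns]
      ring_nf

lemma pvAlt_eq (pixel_indices : List Int) (w h t l : Int) (hne : pixel_indices ≠ []) :
    compress_rand_to_hypfer_alt pixel_indices w h t l
      = pvBcore (pixel_indices.map (pvCoord w h t l)) := by
  unfold compress_rand_to_hypfer_alt pvBcore pvTrueIdx
  rw [if_neg hne]

-- ===== VERDICT (by name: the statement is the Claim_ definition above) =====
theorem compress_rand_to_hypfer_spec : Claim_equal_compress_rand_to_hypfer := by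
  intro pix w h t l _ _
  unfold Spec_compress_rand_to_hypfer
  cases pix with
  | nil => simp [compress_rand_to_hypfer, compress_rand_to_hypfer_alt]
  | cons a as =>
    rw [pvAlt_eq _ w h t l (List.cons_ne_nil a as),
      pvBcore_eq ((a :: as).map (pvCoord w h t l)).length _ le_rfl (by simp)]
    unfold compress_rand_to_hypfer
    rw [if_neg (List.cons_ne_nil a as)]
    simp only [List.foldl_cons, pvStepA, List.map_cons]
    have hA := pvFoldA w h t l as [] (PySem.Int.mod a w + l)
      ((h - 1) - PySem.Int.floordiv a w + t) 1 ((h - 1) - PySem.Int.floordiv a w + t)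
    have hx1 : PySem.Int.mod a w + l + 1 - 1 = PySem.Int.mod a w + l := by ring
    rw [hx1] at hA
    rw [show pvEmitRuns (pvCoord w h t l a :: as.map (pvCoord w h t l))
          = (pvCoord w h t l a).1 :: (pvCoord w h t l a).2 ::
            (((pvCountCont (pvCoord w h t l a) (as.map (pvCoord w h t l))).1 + 1 : Nat) : Int) ::
            pvEmitRuns (pvCountCont (pvCoord w h t l a) (as.map (pvCoord w h t l))).2
          from by rw [pvEmitRuns]]
    simpa [pvFinA, pvCoord, add_comm] using hA
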